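-- pv_equiv track=rewrite | github.com/baobinhday/xiaozhi-mcp-test | src/mcp_xiaozhi/config.py | get_enabled_servers
-- ===== SOURCE A (Python) =====
-- from typing import Any, Dict
--
-- def get_enabled_servers(config: Dict[str, Any]) -> tuple[list[str], list[str]]:
--     """Get enabled and disabled servers from config.
--
--     Args:
--         config: Configuration dictionary
--
--     Returns:
--         Tuple of (enabled_servers, disabled_servers)
--     """
--     servers_cfg = config.get("mcpServers", {}) if isinstance(config, dict) else {}
--     all_servers = list(servers_cfg.keys())
--
--     enabled = [
--         name for name, entry in servers_cfg.items()
--         if not (entry or {}).get("disabled")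
--     ]
--     disabled = [name for name in all_servers if name not in enabled]
--
--     return enabled, disabled
-- ===== SOURCE B (Python) =====
-- def get_enabled_servers(config):
--     """Single-pass partition: each server goes straight to enabled or disabled."""
--     servers_cfg = config.get("mcpServers", {}) if isinstance(config, dict) else {}
--     enabled, disabled = [], []
--     for name, entry in servers_cfg.items():
--         if (entry or {}).get("disabled"):
--             disabled.append(name)
--         else:
--             enabled.append(name)
--     return enabled, disabled
-- ===== Notes on version B (the rewrite author's own statement) =====
-- stated objective: simpler
-- what changed: A builds the enabled list by one comprehension and then rescans all server names with a list-membership test against it to get the disabled list; B partitions in a single pass, appending each name directly to enabled or disabled, so the membership-based second pass disappears.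
import Mathlib
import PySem

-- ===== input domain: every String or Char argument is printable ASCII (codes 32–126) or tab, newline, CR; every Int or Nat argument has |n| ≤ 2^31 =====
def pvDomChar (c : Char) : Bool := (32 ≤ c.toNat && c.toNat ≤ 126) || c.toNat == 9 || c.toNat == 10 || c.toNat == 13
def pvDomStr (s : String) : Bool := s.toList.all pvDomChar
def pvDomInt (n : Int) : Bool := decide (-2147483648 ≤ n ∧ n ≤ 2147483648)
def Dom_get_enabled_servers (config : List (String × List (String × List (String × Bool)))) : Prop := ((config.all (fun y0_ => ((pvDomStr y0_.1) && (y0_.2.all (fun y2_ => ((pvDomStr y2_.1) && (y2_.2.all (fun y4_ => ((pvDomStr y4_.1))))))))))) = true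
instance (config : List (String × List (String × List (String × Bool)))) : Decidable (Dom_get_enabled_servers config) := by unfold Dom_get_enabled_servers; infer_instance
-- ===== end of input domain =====

-- B replaces A's comprehension + list-membership rescan by a single-pass partition
-- into (enabled, disabled); return values agree on dict-shaped inputs (distinct server keys).


-- ===== PORT A =====
-- not (entry or {}).get("disabled")   (falsy: missing key, None-never, or False)
def pvNotDisabledA (entry : List (String × Bool)) : Bool :=
  match (PySem.Dict.mk (if entry.isEmpty then [] else entry)).get? "disabled" with
  | none => true
  | some b => !b

def get_enabled_servers (config : List (String × List (String × List (String × Bool)))) : List String × List String :=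
  let servers_cfg := ((PySem.Dict.mk config).get? "mcpServers").getD []
  let all_servers := servers_cfg.map (·.1)
  let enabled := (servers_cfg.filter (fun p => pvNotDisabledA p.2)).map (·.1)
  let disabled := all_servers.filter (fun name => !enabled.contains name)
  (enabled, disabled)

-- ===== PORT B =====
-- (entry or {}).get("disabled")  truthy test of B's branch
def pvEntryDisabledB (entry : List (String × Bool)) : Bool :=
  ((PySem.Dict.mk (if entry.isEmpty then [] else entry)).get? "disabled").getD false

def get_enabled_servers_alt (config : List (String × List (String × List (String × Bool)))) : List String × List String :=
  let servers_cfg := ((PySem.Dict.mk config).get? "mcpServers").getD []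
  servers_cfg.foldl
    (fun (acc : List String × List String) p =>
      if pvEntryDisabledB p.2 then (acc.1, acc.2 ++ [p.1]) else (acc.1 ++ [p.1], acc.2))
    ([], [])

-- ===== PRECONDITION & SPEC =====
-- Pre_ excludes association lists whose inner server table carries duplicate server names:
-- such inputs are unrepresentable as a Python dict, so A's value there is an artefact of the
-- list encoding (its second pass drops a disabled duplicate of an enabled name).
def Pre_get_enabled_servers (config : List (String × List (String × List (String × Bool)))) : Prop :=
  (((((PySem.Dict.mk config).get? "mcpServers").getD []).map (·.1)).Nodup)
instance (config : List (String × List (String × List (String × Bool)))) : Decidable (Pre_get_enabled_servers config) := by unfold Pre_get_enabled_servers; infer_instance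
def pvWitness_get_enabled_servers : (List (String × List (String × List (String × Bool)))) :=
  [("mcpServers", [("a", [("disabled", true)]), ("b", []), ("c", [("disabled", false)])])]
def Spec_get_enabled_servers (config : List (String × List (String × List (String × Bool)))) (out : List String × List String) : Prop := out = get_enabled_servers_alt config
instance (config : List (String × List (String × List (String × Bool)))) (out : List String × List String) : Decidable (Spec_get_enabled_servers config out) := by unfold Spec_get_enabled_servers; infer_instance

-- ===== CLAIM (what is proved, stated in full; the proofs are below) =====
def Claim_equal_get_enabled_servers : Prop := ∀ (config : List (String × List (String × List (String × Bool)))), Dom_get_enabled_servers config → Pre_get_enabled_servers config → Spec_get_enabled_servers config (get_enabled_servers config)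

-- ===== LEMMAS AND PROOFS =====
lemma notDisabled_eq (e : List (String × Bool)) : pvNotDisabledA e = !pvEntryDisabledB e := by
  unfold pvNotDisabledA pvEntryDisabledB
  cases (PySem.Dict.mk (if e.isEmpty then [] else e)).get? "disabled" with
  | none => rfl
  | some b => cases b <;> rfl

lemma foldl_partition (l : List (String × List (String × Bool))) (a b : List String) :
    l.foldl (fun (acc : List String × List String) p =>
      if pvEntryDisabledB p.2 then (acc.1, acc.2 ++ [p.1]) else (acc.1 ++ [p.1], acc.2)) (a, b)
    = (a ++ (l.filter (fun p => !pvEntryDisabledB p.2)).map (·.1),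
       b ++ (l.filter (fun p => pvEntryDisabledB p.2)).map (·.1)) := by
  induction l generalizing a b with
  | nil => simp
  | cons h t ih =>
    simp only [List.foldl_cons, List.filter_cons]
    cases hd : pvEntryDisabledB h.2 <;> simp [ih]

lemma enabled_subset (l : List (String × List (String × Bool)))
    {n : String} (h : n ∈ (l.filter (fun p => pvNotDisabledA p.2)).map (·.1)) :
    n ∈ l.map (·.1) := by
  simp only [List.mem_map] at h ⊢
  obtain ⟨p, hp, rfl⟩ := h
  exact ⟨p, List.mem_of_mem_filter hp, rfl⟩

lemma second_pass (l : List (String × List (String × Bool)))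
    (hnd : (l.map (·.1)).Nodup) :
    (l.map (·.1)).filter (fun name => !((l.filter (fun p => pvNotDisabledA p.2)).map (·.1)).contains name)
    = (l.filter (fun p => !pvNotDisabledA p.2)).map (·.1) := by
  induction l with
  | nil => rfl
  | cons h t ih =>
    simp only [List.map_cons, List.nodup_cons] at hnd
    obtain ⟨hh, hnd⟩ := hnd
    have ht' := ih hnd
    cases hA : pvNotDisabledA h.2 with
    | true =>
      have hE : (h :: t).filter (fun p => pvNotDisabledA p.2)
          = h :: t.filter (fun p => pvNotDisabledA p.2) := by
        simp [hA]
      have hD : (h :: t).filter (fun p => !pvNotDisabledA p.2)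
          = t.filter (fun p => !pvNotDisabledA p.2) := by
        simp [hA]
      rw [hE, hD, List.map_cons, List.map_cons, List.filter_cons]
      have hhead : (!(h.1 :: (t.filter (fun p => pvNotDisabledA p.2)).map (·.1)).contains h.1) = false := by
        simp
      rw [hhead]
      have hcong : ∀ n ∈ t.map (·.1),
          (!((h.1 :: (t.filter (fun p => pvNotDisabledA p.2)).map (·.1)).contains n))
          = (!((t.filter (fun p => pvNotDisabledA p.2)).map (·.1)).contains n) := by
        intro n hn
        have hne : n ≠ h.1 := fun e => hh (e ▸ hn)
        simp [hne]
      rw [if_neg (by simp), List.filter_congr hcong, ht']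
    | false =>
      have hE : (h :: t).filter (fun p => pvNotDisabledA p.2)
          = t.filter (fun p => pvNotDisabledA p.2) := by
        simp [hA]
      have hD : (h :: t).filter (fun p => !pvNotDisabledA p.2)
          = h :: t.filter (fun p => !pvNotDisabledA p.2) := by
        simp [hA]
      rw [hE, hD, List.map_cons, List.map_cons, List.filter_cons]
      have hheadkeep : (!((t.filter (fun p => pvNotDisabledA p.2)).map (·.1)).contains h.1) = true := by
        simp only [Bool.not_eq_eq_eq_not, Bool.not_true, ← Bool.not_eq_true]
        intro hc
        simp only [List.contains_eq_mem, decide_eq_true_eq] at hc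
        exact hh (enabled_subset t hc)
      rw [if_pos hheadkeep, ht']

lemma filterA_eq (l : List (String × List (String × Bool))) :
    l.filter (fun p => pvNotDisabledA p.2) = l.filter (fun p => !pvEntryDisabledB p.2) := by
  simp [notDisabled_eq]

lemma filterA_eq' (l : List (String × List (String × Bool))) :
    l.filter (fun p => !pvNotDisabledA p.2) = l.filter (fun p => pvEntryDisabledB p.2) := by
  simp [notDisabled_eq]

-- ===== VERDICT (by name: the statement is the Claim_ definition above) =====
theorem get_enabled_servers_spec : Claim_equal_get_enabled_servers := by
  intro config _ hpre
  unfold Spec_get_enabled_servers get_enabled_servers get_enabled_servers_alt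
  unfold Pre_get_enabled_servers at hpre
  set l := ((PySem.Dict.mk config).get? "mcpServers").getD [] with hl
  rw [foldl_partition, List.nil_append, List.nil_append, ← filterA_eq, ← filterA_eq']
  exact Prod.ext rfl (second_pass l hpre)
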